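-- pv_equiv track=rewrite | github.com/mingliangzhang2018/PGPS | dataset/text_aug.py | get_seq_points
-- ===== SOURCE A (Python) =====
-- def get_seq_points(class_tag):
--     id_list = []
--     begin_point_id = end_point_id = None
--     for id, token in enumerate(class_tag):
--         if token == '[POINT]':
--             if begin_point_id is None:
--                 begin_point_id = id
--         elif not begin_point_id is None and end_point_id is None:
--             end_point_id = id
--             id_list.append((begin_point_id, end_point_id-1))
--             begin_point_id = end_point_id = None
--     if not begin_point_id is None and end_point_id is None:
--         id_list.append((begin_point_id, len(class_tag)-1))
--
--     return id_list
-- ===== SOURCE B (Python) =====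
-- def get_seq_points(class_tag):
--     # Pass 1: collect the indices of all '[POINT]' tokens.
--     points = [i for i, t in enumerate(class_tag) if t == '[POINT]']
--     # Pass 2: merge consecutive indices into inclusive (start, end) runs.
--     runs = []
--     for i in points:
--         if runs and runs[-1][1] == i - 1:
--             runs[-1][1] = i
--         else:
--             runs.append([i, i])
--     return [(s, e) for s, e in runs]
-- ===== Notes on version B (the rewrite author's own statement) =====
-- stated objective: simpler
-- what changed: Replaces the begin/end sentinel state machine with a trailing-run special case by a two-pass approach: collect all '[POINT]' indices, then merge consecutive indices into inclusive runs.
import Mathlib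
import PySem

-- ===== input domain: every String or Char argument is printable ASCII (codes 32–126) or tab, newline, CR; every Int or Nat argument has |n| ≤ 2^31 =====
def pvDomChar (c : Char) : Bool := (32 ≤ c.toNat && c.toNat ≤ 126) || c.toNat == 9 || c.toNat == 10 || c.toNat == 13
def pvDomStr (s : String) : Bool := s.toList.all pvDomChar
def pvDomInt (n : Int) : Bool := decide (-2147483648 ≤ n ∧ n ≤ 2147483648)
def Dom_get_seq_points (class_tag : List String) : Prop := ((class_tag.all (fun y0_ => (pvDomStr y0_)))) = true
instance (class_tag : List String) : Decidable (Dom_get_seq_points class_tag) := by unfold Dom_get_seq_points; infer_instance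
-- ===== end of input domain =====

-- B replaces A's begin/end sentinel state machine (with its separate trailing-run append)
-- by two passes: collect the indices of '[POINT]' tokens, then merge consecutive indices
-- into inclusive runs (objective: simpler).

-- ===== PORT A =====
-- loop body of A: state = (id_list, begin_point_id, end_point_id), input = (id, token)
def pvStepA (s : List (Int × Int) × Option Int × Option Int) (p : Int × String) :
    List (Int × Int) × Option Int × Option Int :=
  match s with
  | (id_list, b, e) =>
    if p.2 = "[POINT]" then
      if b = none then (id_list, some p.1, e) else (id_list, b, e)
    else if b ≠ none ∧ e = none then
      match b with
      | some bv => (id_list ++ [(bv, p.1 - 1)], none, none)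
      | none => (id_list, b, e)  -- unreachable: guarded by b ≠ none
    else (id_list, b, e)

def get_seq_points (class_tag : List String) : List (Int × Int) :=
  match (PySem.List.enumerate class_tag).foldl pvStepA ([], none, none) with
  | (id_list, b, e) =>
    if b ≠ none ∧ e = none then
      match b with
      | some bv => id_list ++ [(bv, (class_tag.length : Int) - 1)]
      | none => id_list  -- unreachable
    else id_list

-- ===== PORT B =====
-- loop body of B's second pass: extend the last run if this point index is adjacent
def pvStepB (runs : List (Int × Int)) (i : Int) : List (Int × Int) :=
  match runs.getLast? with
  | some last => if last.2 = i - 1 then runs.dropLast ++ [(last.1, i)] else runs ++ [(i, i)]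
  | none => runs ++ [(i, i)]

def get_seq_points_alt (class_tag : List String) : List (Int × Int) :=
  let points := (PySem.List.enumerate class_tag).filterMap
    (fun p => if p.2 = "[POINT]" then some p.1 else none)
  let runs := points.foldl pvStepB []
  runs.map (fun r => (r.1, r.2))

-- ===== PRECONDITION & SPEC =====
def Spec_get_seq_points (class_tag : List String) (out : List (Int × Int)) : Prop := out = get_seq_points_alt class_tag
instance (class_tag : List String) (out : List (Int × Int)) : Decidable (Spec_get_seq_points class_tag out) := by unfold Spec_get_seq_points; infer_instance

-- ===== CLAIM (what is proved, stated in full; the proofs are below) =====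
def Claim_equal_get_seq_points : Prop := ∀ (class_tag : List String), Dom_get_seq_points class_tag → Spec_get_seq_points class_tag (get_seq_points class_tag)

-- ===== LEMMAS AND PROOFS =====

-- A's loop from position pos with state (acc, b, none)
def pvAfold (l : List String) (pos : Int) (st : List (Int × Int) × Option Int × Option Int) :
    List (Int × Int) × Option Int × Option Int :=
  (PySem.List.enumerate l pos).foldl pvStepA st

-- A's trailing append, with `pos` standing for len(class_tag)
def pvFinish (pos : Int) (st : List (Int × Int) × Option Int × Option Int) : List (Int × Int) :=
  match st with
  | (id_list, b, e) =>
    if b ≠ none ∧ e = none then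
      match b with
      | some bv => id_list ++ [(bv, pos - 1)]
      | none => id_list
    else id_list

-- B's fold over the point indices of l enumerated from pos
def pvBfold (l : List String) (pos : Int) (runs : List (Int × Int)) : List (Int × Int) :=
  ((PySem.List.enumerate l pos).filterMap
    (fun p => if p.2 = "[POINT]" then some p.1 else none)).foldl pvStepB runs

-- B's runs corresponding to A's state (acc, b) at position pos
def pvRuns (pos : Int) (acc : List (Int × Int)) (b : Option Int) : List (Int × Int) :=
  match b with
  | none => acc
  | some s => acc ++ [(s, pos - 1)]

lemma pv_main (l : List String) : ∀ (pos : Int) (acc : List (Int × Int)) (b : Option Int),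
    (b = none → ∀ x ∈ acc.getLast?, x.2 < pos - 1) →
    pvFinish (pos + l.length) (pvAfold l pos (acc, b, none)) = pvBfold l pos (pvRuns pos acc b) := by
  induction l with
  | nil =>
    intro pos acc b _
    cases b <;> simp [pvAfold, pvBfold, pvFinish, pvRuns, PySem.List.enumerate_nil]
  | cons t r ih =>
    intro pos acc b hb
    have hlen : pos + ((t :: r).length : Int) = (pos + 1) + (r.length : Int) := by
      simp [List.length_cons]; ring
    rw [hlen]
    by_cases ht : t = "[POINT]"
    · cases b with
      | none =>
        -- A opens a run at pos; B starts a new run (pos, pos) (no merge: last end < pos-1)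
        have hstep : pvAfold (t :: r) pos (acc, none, none)
            = pvAfold r (pos + 1) (acc, some pos, none) := by
          simp [pvAfold, PySem.List.enumerate_cons, pvStepA, ht]
        have hs : pvStepB acc pos = acc ++ [(pos, pos)] := by
          unfold pvStepB
          cases hlast : acc.getLast? with
          | none => simp
          | some x =>
            have hx := hb rfl x (by simp [hlast])
            have : ¬ x.2 = pos - 1 := by omega
            simp [this]
        have hB : pvBfold (t :: r) pos acc = pvBfold r (pos + 1) (acc ++ [(pos, pos)]) := by
          simp [pvBfold, PySem.List.enumerate_cons, ht, hs]
        rw [hstep, show pvRuns pos acc none = acc from rfl, hB]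
        have := ih (pos + 1) acc (some pos) (by simp)
        simpa [pvRuns] using this
      | some s =>
        -- A keeps the open run; B merges pos into the last run (s, pos-1) → (s, pos)
        have hstep : pvAfold (t :: r) pos (acc, some s, none)
            = pvAfold r (pos + 1) (acc, some s, none) := by
          simp [pvAfold, PySem.List.enumerate_cons, pvStepA, ht]
        have hs : pvStepB (acc ++ [(s, pos - 1)]) pos = acc ++ [(s, pos)] := by
          unfold pvStepB
          simp
        have hB : pvBfold (t :: r) pos (acc ++ [(s, pos - 1)])
            = pvBfold r (pos + 1) (acc ++ [(s, pos)]) := by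
          simp [pvBfold, PySem.List.enumerate_cons, ht, hs]
        rw [hstep, show pvRuns pos acc (some s) = acc ++ [(s, pos - 1)] from rfl, hB]
        have := ih (pos + 1) acc (some s) (by simp)
        simpa [pvRuns] using this
    · cases b with
      | none =>
        -- nothing happens on either side
        have hstep : pvAfold (t :: r) pos (acc, none, none)
            = pvAfold r (pos + 1) (acc, none, none) := by
          simp [pvAfold, PySem.List.enumerate_cons, pvStepA, ht]
        have hB : pvBfold (t :: r) pos acc = pvBfold r (pos + 1) acc := by
          simp [pvBfold, PySem.List.enumerate_cons, ht]
        rw [hstep, show pvRuns pos acc none = acc from rfl, hB]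
        have := ih (pos + 1) acc none (by
          intro _ x hx
          have := hb rfl x hx
          omega)
        simpa [pvRuns] using this
      | some s =>
        -- A closes the run, appending (s, pos-1); B's runs already end with (s, pos-1)
        have hstep : pvAfold (t :: r) pos (acc, some s, none)
            = pvAfold r (pos + 1) (acc ++ [(s, pos - 1)], none, none) := by
          simp [pvAfold, PySem.List.enumerate_cons, pvStepA, ht]
        have hB : pvBfold (t :: r) pos (acc ++ [(s, pos - 1)])
            = pvBfold r (pos + 1) (acc ++ [(s, pos - 1)]) := by
          simp [pvBfold, PySem.List.enumerate_cons, ht]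
        rw [hstep, show pvRuns pos acc (some s) = acc ++ [(s, pos - 1)] from rfl, hB]
        have := ih (pos + 1) (acc ++ [(s, pos - 1)]) none (by
          intro _ x hx
          rw [List.getLast?_concat] at hx
          simp at hx
          subst hx
          simp)
        simpa [pvRuns] using this

-- ===== VERDICT (by name: the statement is the Claim_ definition above) =====
theorem get_seq_points_spec : Claim_equal_get_seq_points := by
  intro class_tag _
  unfold Spec_get_seq_points
  have h := pv_main class_tag 0 [] none (by simp)
  have hA : get_seq_points class_tag
      = pvFinish (0 + (class_tag.length : Int)) (pvAfold class_tag 0 ([], none, none)) := by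
    simp [get_seq_points, pvAfold, pvFinish]
  have hB : get_seq_points_alt class_tag = pvBfold class_tag 0 [] := by
    simp [get_seq_points_alt, pvBfold]
  rw [hA, hB, h]
  simp [pvRuns]
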